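-- pv_equiv track=rewrite | github.com/baubrun/Challenges-PY | Challenges/identical_filter.py | identical_Filter
-- ===== SOURCE A (Python) =====
-- def identical_Filter(arr):
--     l = []
--     for i in range(len(arr)):
--         s = set()
--         split = [l for l in arr[i]]
--         s = {c for c in split}
--         if len(s) == 1:
--             l.append(arr[i])
--     return l
-- ===== SOURCE B (Python) =====
-- def identical_Filter(arr):
--     return [w for w in arr if w and w == w[0] * len(w)]
-- ===== Notes on version B (the rewrite author's own statement) =====
-- stated objective: simpler
-- what changed: Replaces the index loop with per-element set construction and cardinality test by a single comprehension keeping a string iff it equals its first character repeated len(w) times.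
import Mathlib
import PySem

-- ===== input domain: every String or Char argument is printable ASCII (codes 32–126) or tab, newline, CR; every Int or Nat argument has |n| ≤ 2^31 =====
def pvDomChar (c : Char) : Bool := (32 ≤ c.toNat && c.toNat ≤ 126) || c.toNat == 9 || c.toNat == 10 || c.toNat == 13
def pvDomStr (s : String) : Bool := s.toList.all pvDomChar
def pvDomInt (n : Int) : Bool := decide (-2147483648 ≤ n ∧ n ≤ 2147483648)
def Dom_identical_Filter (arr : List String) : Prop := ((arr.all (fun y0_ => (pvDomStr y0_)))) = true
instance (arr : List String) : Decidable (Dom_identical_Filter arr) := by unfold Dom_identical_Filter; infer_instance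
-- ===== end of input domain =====

-- B simplifies A: a comprehension keeping w iff w is nonempty and equals w[0] repeated len(w) times,
-- instead of building a character set per string and testing its cardinality.

-- ===== PORT A =====
-- for i in range(len(arr)): s = {c for c in arr[i]}; if len(s) == 1: l.append(arr[i])
def identical_Filter (arr : List String) : List String :=
  (PySem.List.pyRange 0 (arr.length : Int) 1).foldl
    (fun l i =>
      let w := PySem.List.pyGetD arr i ""
      let split := w.toList
      let s := PySem.Set.ofList split
      if PySem.Set.len s = 1 then l ++ [w] else l)
    []

-- ===== PORT B =====
-- [w for w in arr if w and w == w[0] * len(w)]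
def identical_Filter_alt (arr : List String) : List String :=
  arr.filter (fun w =>
    match w.toList with
    | [] => false
    | c :: _ => w.toList == List.replicate w.toList.length c)

-- ===== PRECONDITION & SPEC =====
def Spec_identical_Filter (arr : List String) (out : List String) : Prop := out = identical_Filter_alt arr
instance (arr : List String) (out : List String) : Decidable (Spec_identical_Filter arr out) := by unfold Spec_identical_Filter; infer_instance

-- ===== CLAIM (what is proved, stated in full; the proofs are below) =====
def Claim_equal_identical_Filter : Prop := ∀ (arr : List String), Dom_identical_Filter arr → Spec_identical_Filter arr (identical_Filter arr)

-- ===== LEMMAS AND PROOFS =====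

lemma ofList_const {c : Char} : ∀ (cs : List Char), (∀ x ∈ cs, x = c) →
    PySem.Set.ofList (c :: cs) = [c] := by
  intro cs h
  have key : ∀ (s : PySem.Set Char) (cs : List Char), (∀ x ∈ cs, x = c) → c ∈ s →
      cs.foldl PySem.Set.add s = s := by
    intro s cs
    induction cs generalizing s with
    | nil => intro _ _; rfl
    | cons x xs ih =>
      intro hall hc
      have hx : x = c := hall x (by simp)
      subst hx
      simp only [List.foldl_cons]
      rw [show PySem.Set.add s x = s by simp [PySem.Set.add, PySem.Set.contains, hc]]
      exact ih s (fun y hy => hall y (by simp [hy])) hc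
  have h1 : PySem.Set.ofList (c :: cs) = cs.foldl PySem.Set.add [c] := by
    simp [PySem.Set.ofList_eq_foldl, PySem.Set.add, PySem.Set.contains]
  rw [h1, key [c] cs h (by simp)]

lemma len_one_iff (w : String) :
    (PySem.Set.len (PySem.Set.ofList w.toList) = 1) ↔
      ((match w.toList with
        | [] => false
        | c :: _ => w.toList == List.replicate w.toList.length c) = true) := by
  match hl : w.toList with
  | [] => simp [PySem.Set.ofList, PySem.Set.len]
  | c :: cs =>
    simp only [List.length_cons, List.replicate_succ, beq_iff_eq, List.cons.injEq,
      true_and, List.eq_replicate_iff]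
    constructor
    · intro hlen x hx
      by_contra hxc
      have hcmem : c ∈ PySem.Set.ofList (c :: cs) := by
        rw [PySem.Set.mem_ofList]; simp
      have hxmem : x ∈ PySem.Set.ofList (c :: cs) := by
        rw [PySem.Set.mem_ofList]; simp [hx]
      have hlen' : (PySem.Set.ofList (c :: cs)).length = 1 := by
        simp only [PySem.Set.len] at hlen; omega
      match hs : PySem.Set.ofList (c :: cs) with
      | [y] =>
        rw [hs] at hcmem hxmem
        simp at hcmem hxmem
        exact hxc (hxmem.trans hcmem.symm)
      | [] => rw [hs] at hcmem; simp at hcmem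
      | y :: z :: rest => rw [hs] at hlen'; simp at hlen'
    · intro hall
      rw [ofList_const cs hall]
      rfl

lemma foldl_main :
    ∀ (arr : List String) (init : List String),
      arr.foldl (fun l w => if PySem.Set.len (PySem.Set.ofList w.toList) = 1 then l ++ [w] else l) init
        = init ++ arr.filter (fun w =>
            match w.toList with
            | [] => false
            | c :: _ => w.toList == List.replicate w.toList.length c) := by
  intro arr
  induction arr with
  | nil => intro init; simp
  | cons w ws ih =>
    intro init
    simp only [List.foldl_cons, List.filter_cons]
    by_cases h : PySem.Set.len (PySem.Set.ofList w.toList) = 1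
    · rw [if_pos h, ih, (len_one_iff w).mp h]
      simp
    · rw [if_neg h, ih]
      have : (match w.toList with
        | [] => false
        | c :: _ => w.toList == List.replicate w.toList.length c) = false := by
        by_contra hb
        exact h ((len_one_iff w).mpr (by revert hb; cases (match w.toList with
          | [] => false
          | c :: _ => w.toList == List.replicate w.toList.length c) <;> simp))
      rw [this]
      simp

-- ===== VERDICT (by name: the statement is the Claim_ definition above) =====
theorem identical_Filter_spec : Claim_equal_identical_Filter := by
  intro arr _
  show identical_Filter arr = identical_Filter_alt arr
  unfold identical_Filter identical_Filter_alt
  rw [PySem.List.foldl_pyRange_zero_pyGetD' arr ""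
      (fun l w => if PySem.Set.len (PySem.Set.ofList w.toList) = 1 then l ++ [w] else l) []]
  rw [foldl_main]
  simp
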